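-- pv_equiv track=rewrite | github.com/paiml/depyler | examples/hard_edge_flag_patterns.py | count_transitions
-- ===== SOURCE A (Python) =====
-- def count_transitions(arr: list[int]) -> int:
--     """Count number of times the sign changes in the array."""
--     if len(arr) <= 1:
--         return 0
--     transitions: int = 0
--     i: int = 1
--     while i < len(arr):
--         prev_pos: int = 0
--         if arr[i - 1] > 0:
--             prev_pos = 1
--         curr_pos: int = 0
--         if arr[i] > 0:
--             curr_pos = 1
--         if prev_pos != curr_pos:
--             transitions = transitions + 1
--         i = i + 1
--     return transitions
-- ===== SOURCE B (Python) =====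
-- def count_transitions(arr: list[int]) -> int:
--     """Count number of times the sign changes in the array."""
--     runs = 0
--     i = 0
--     n = len(arr)
--     while i < n:
--         pos = arr[i] > 0
--         while i < n and (arr[i] > 0) == pos:
--             i += 1
--         runs += 1
--     return max(runs - 1, 0)
-- ===== Notes on version B (the rewrite author's own statement) =====
-- stated objective: alternative
-- what changed: Instead of A's element-by-element pass comparing adjacent sign flags, B groups the array into maximal runs of equal positivity (outer loop per run, inner loop skipping the run) and returns the number of runs minus one, clamped at zero.
import Mathlib
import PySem

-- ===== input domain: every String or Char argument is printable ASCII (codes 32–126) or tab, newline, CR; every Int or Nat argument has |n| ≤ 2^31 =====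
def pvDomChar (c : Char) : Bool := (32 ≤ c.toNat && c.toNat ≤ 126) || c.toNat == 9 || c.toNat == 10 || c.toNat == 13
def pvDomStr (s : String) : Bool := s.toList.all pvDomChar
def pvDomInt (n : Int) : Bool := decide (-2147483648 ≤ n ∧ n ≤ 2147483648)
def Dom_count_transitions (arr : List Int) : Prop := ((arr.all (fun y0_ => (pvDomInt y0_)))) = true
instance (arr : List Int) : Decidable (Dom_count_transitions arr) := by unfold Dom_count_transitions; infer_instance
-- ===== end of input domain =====

-- B replaces A's element-wise adjacent-flag comparison by a run decomposition: it skips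
-- each maximal run of equal positivity, counts the runs, and returns runs-1 clamped at 0.


-- ===== PORT A =====
-- while i < len(arr): compare sign flags of arr[i-1] and arr[i]; indices are always in
-- range, so the pyGetD default 0 is never consulted.
def count_transitions (arr : List Int) : Int :=
  if (arr.length : Int) ≤ 1 then 0
  else
    (PySem.List.pyRange 1 (arr.length : Int) 1).foldl
      (fun transitions i =>
        let prev_pos : Int := if PySem.List.pyGetD arr (i - 1) 0 > 0 then 1 else 0
        let curr_pos : Int := if PySem.List.pyGetD arr i 0 > 0 then 1 else 0
        if prev_pos ≠ curr_pos then transitions + 1 else transitions)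
      0

-- ===== PORT B =====
-- outer while = one recursive step per run; inner while (skip the current run) = dropWhile
def countRuns : List Int → Int
  | [] => 0
  | x :: xs => 1 + countRuns (xs.dropWhile (fun y => decide (y > 0) == decide (x > 0)))
termination_by l => l.length
decreasing_by
  simpa using Nat.lt_succ_of_le (List.length_dropWhile_le _ _)

def count_transitions_alt (arr : List Int) : Int :=
  max (countRuns arr - 1) 0

-- ===== PRECONDITION & SPEC =====
def Spec_count_transitions (arr : List Int) (out : Int) : Prop := out = count_transitions_alt arr
instance (arr : List Int) (out : Int) : Decidable (Spec_count_transitions arr out) := by unfold Spec_count_transitions; infer_instance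

-- ===== CLAIM (what is proved, stated in full; the proofs are below) =====
def Claim_equal_count_transitions : Prop := ∀ (arr : List Int), Dom_count_transitions arr → Spec_count_transitions arr (count_transitions arr)

-- ===== LEMMAS AND PROOFS =====

-- common reference: count of adjacent pairs whose (· > 0) flags differ
def pairCount : List Int → Int
  | x :: y :: r => (if (x > 0) = (y > 0) then 0 else 1) + pairCount (y :: r)
  | _ => 0

theorem pairCount_nonneg : ∀ l : List Int, 0 ≤ pairCount l := by
  intro l
  induction l with
  | nil => simp [pairCount]
  | cons x xs ih =>
    cases xs with
    | nil => simp [pairCount]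
    | cons y r =>
      simp only [pairCount] at *
      split_ifs <;> omega

theorem flag_if (a b : Prop) [Decidable a] [Decidable b] (t : Int) :
    (if (if a then (1 : Int) else 0) ≠ (if b then (1 : Int) else 0) then t + 1 else t)
      = if a = b then t else t + 1 := by
  by_cases ha : a <;> by_cases hb : b <;> simp [ha, hb]

-- dropping the rest of the head's run removes exactly the pairs inside the run (flags
-- equal), and the run boundary (if any) contributes exactly one differing pair
theorem pairCount_dropRun : ∀ (xs : List Int) (x : Int),
    pairCount (x :: xs)
      = pairCount (xs.dropWhile (fun y => decide (y > 0) == decide (x > 0)))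
        + (if xs.dropWhile (fun y => decide (y > 0) == decide (x > 0)) = [] then 0 else 1) := by
  intro xs
  induction xs with
  | nil => intro x; simp [pairCount]
  | cons y r ih =>
    intro x
    by_cases h : (decide (y > 0) == decide (x > 0)) = true
    · have hd : decide (y > 0) = decide (x > 0) := beq_iff_eq.mp h
      have hkey : (y > 0) = (x > 0) := propext (decide_eq_decide.mp hd)
      have hdrop : List.dropWhile (fun z => decide (z > 0) == decide (x > 0)) (y :: r)
          = List.dropWhile (fun z => decide (z > 0) == decide (y > 0)) r := by
        have hfun : (fun z : Int => decide (z > 0) == decide (x > 0))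
            = (fun z : Int => decide (z > 0) == decide (y > 0)) := by
          funext z; rw [hd]
        rw [hfun, List.dropWhile_cons]
        simp [hd]
      have hx : pairCount (x :: y :: r) = pairCount (y :: r) := by
        simp [pairCount, hkey.symm]
      rw [hdrop, hx, ih y]
    · have hdrop : List.dropWhile (fun z => decide (z > 0) == decide (x > 0)) (y :: r)
          = y :: r := by
        rw [List.dropWhile_cons]
        simp [h]
      rw [hdrop]
      have hkey : ¬ ((x > 0) = (y > 0)) := by
        intro hh
        exact h (by simp [hh])
      simp [pairCount, hkey]
      omega

theorem countRuns_eq : ∀ l : List Int,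
    countRuns l = pairCount l + (if l = [] then 0 else 1) := by
  intro l
  induction l using countRuns.induct with
  | case1 => simp [countRuns, pairCount]
  | case2 x xs ih =>
    rw [countRuns, ih, pairCount_dropRun xs x]
    split_ifs <;> simp <;> omega

-- pyGetD-indexed fold over range equals pairCount
theorem a_fold (x : Int) (xs : List Int) (acc : Int) :
    (List.range xs.length).foldl
      (fun t k =>
        if ((x :: xs).getD k 0 > 0) = ((x :: xs).getD (k + 1) 0 > 0) then t else t + 1)
      acc = acc + pairCount (x :: xs) := by
  induction xs generalizing x acc with
  | nil => simp [pairCount]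
  | cons y r ih =>
    simp only [List.length_cons]
    rw [List.range_succ_eq_map, List.foldl_cons, List.foldl_map]
    simp only [Nat.succ_eq_add_one]
    have step :
        (fun (t : Int) (k : Nat) =>
            if ((x :: y :: r).getD (k + 1) 0 > 0) = ((x :: y :: r).getD (k + 1 + 1) 0 > 0)
            then t else t + 1)
          = (fun (t : Int) (k : Nat) =>
            if ((y :: r).getD k 0 > 0) = ((y :: r).getD (k + 1) 0 > 0) then t else t + 1) := by
      funext t k
      simp only [List.getD_cons_succ]
    rw [step, ih y]
    simp only [pairCount, List.getD_cons_zero, List.getD_cons_succ, gt_iff_lt]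
    by_cases hx : 0 < x <;> by_cases hy : 0 < y <;> simp [hx, hy] <;> omega

theorem a_eq_pairCount : ∀ arr : List Int, count_transitions arr = pairCount arr := by
  intro arr
  cases arr with
  | nil => rfl
  | cons x xs =>
    cases xs with
    | nil => rfl
    | cons y r =>
      unfold count_transitions
      rw [if_neg (by simp only [List.length_cons]; push_cast; omega)]
      rw [PySem.List.pyRange_one]
      have hlen : (((x :: y :: r).length : Int) - 1).toNat = (y :: r).length := by
        simp
      rw [hlen, List.foldl_map]
      have step :
          (fun (transitions : Int) (k : Nat) =>
              let prev_pos : Int :=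
                if PySem.List.pyGetD (x :: y :: r) (1 + (k : Int) - 1) 0 > 0 then 1 else 0
              let curr_pos : Int :=
                if PySem.List.pyGetD (x :: y :: r) (1 + (k : Int)) 0 > 0 then 1 else 0
              if prev_pos ≠ curr_pos then transitions + 1 else transitions)
            = (fun (t : Int) (k : Nat) =>
              if (((x :: y :: r) : List Int).getD k 0 > 0)
                  = (((x :: y :: r) : List Int).getD (k + 1) 0 > 0) then t else t + 1) := by
        funext t k
        rw [show (1 + (k : Int) - 1) = ((k : Nat) : Int) by omega]
        rw [show (1 + (k : Int)) = (((k + 1 : Nat)) : Int) by push_cast; omega]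
        simp only [PySem.List.pyGetD_natCast]
        exact flag_if ((x :: y :: r).getD k 0 > 0) ((x :: y :: r).getD (k + 1) 0 > 0) t
      rw [step]
      exact (by simpa using a_fold x (y :: r) 0)

theorem alt_eq_pairCount : ∀ arr : List Int, count_transitions_alt arr = pairCount arr := by
  intro arr
  unfold count_transitions_alt
  cases arr with
  | nil => simp [countRuns, pairCount]
  | cons x xs =>
    have h0 := pairCount_nonneg (x :: xs)
    have h1 : countRuns (x :: xs) = pairCount (x :: xs) + 1 := by
      rw [countRuns_eq]; simp
    rw [h1]
    omega

-- ===== VERDICT (by name: the statement is the Claim_ definition above) =====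
theorem count_transitions_spec : Claim_equal_count_transitions := by
  intro arr _
  unfold Spec_count_transitions
  rw [a_eq_pairCount, alt_eq_pairCount]
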